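-- pv_equiv track=rewrite | github.com/benquick123/code-profiling | code/batch-2/vse-naloge-brez-testov/DN5-M-075.py | se_zacne_z
-- ===== SOURCE A (Python) =====
-- def izloci_besedo(beseda):
--     a = ""
--     i = 0
--     for b in beseda:
--         if b.isalnum() == False:
--             i += 1
--         else:
--             a = beseda[i:]
--             break
--     i = 0
--     for b in a[::-1]:
--         if b.isalnum() == False:
--             i += 1
--         else:
--             if i == 0:
--                 break
--             else:
--                 a = a[:-i]
--                 break
--     return a
--
-- def se_zacne_z(tweet, c):
--     temp = []
--     result = []
--     t = tweet.split()
--     for word in t: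
--         if word.startswith(c):
--             temp.append(word)
--     for word in temp:
--         x = izloci_besedo(word)
--         result.append(x)
--     return result
-- ===== SOURCE B (Python) =====
-- def se_zacne_z(tweet, c):
--     def strip(word):
--         idxs = [i for i, ch in enumerate(word) if ch.isalnum()]
--         return word[idxs[0]:idxs[-1] + 1] if idxs else ''
--     return [strip(w) for w in tweet.split() if w.startswith(c)]
-- ===== Notes on version B (the rewrite author's own statement) =====
-- stated objective: simpler
-- what changed: B replaces A's two-phase temp-list build plus per-word double directional count-and-slice scans (forward count of leading non-alnum, reversed count of trailing non-alnum with separate slicing branches) by a single filtered list comprehension whose stripping collects the indices of all alphanumeric characters in one enumerate pass and slices word[idxs[0]:idxs[-1]+1] (or returns '' if none).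
import Mathlib
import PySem

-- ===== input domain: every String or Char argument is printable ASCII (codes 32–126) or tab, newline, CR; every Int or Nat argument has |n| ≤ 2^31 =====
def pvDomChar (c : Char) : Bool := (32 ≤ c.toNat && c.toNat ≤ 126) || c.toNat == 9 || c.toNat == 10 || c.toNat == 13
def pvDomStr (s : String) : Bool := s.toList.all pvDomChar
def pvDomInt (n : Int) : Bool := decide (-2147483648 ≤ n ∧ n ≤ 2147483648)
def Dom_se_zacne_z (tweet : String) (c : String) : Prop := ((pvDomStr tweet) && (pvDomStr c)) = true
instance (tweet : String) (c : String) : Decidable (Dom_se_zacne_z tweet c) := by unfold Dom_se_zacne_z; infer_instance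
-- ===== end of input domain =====

-- B strips each matching word by one enumerate pass collecting the alnum indices and slicing once,
-- instead of A's two directional count-and-slice scans; objective: simpler.

-- ===== PORT A =====
-- first loop of izloci_besedo: i counts leading non-alnum chars; at the first alnum char a = beseda[i:]
def pvFindA (orig : List Char) : List Char → Int → List Char
  | [], _ => []                               -- loop ends, a stays ""
  | b :: rest, i =>
    if (PySem.Chars.isalnum b == false) then pvFindA orig rest (i + 1)
    else PySem.List.slice orig (some i) none  -- a = beseda[i:]; break

-- second loop of izloci_besedo, over a[::-1]: i counts trailing non-alnum; at the first alnum char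
-- either keep a (i == 0) or a = a[:-i]
def pvTrimA (a : List Char) : List Char → Int → List Char
  | [], _ => a                                -- loop ends, a unchanged
  | b :: rest, i =>
    if (PySem.Chars.isalnum b == false) then pvTrimA a rest (i + 1)
    else if i == 0 then a else PySem.List.slice a none (some (-i))

def izloci_besedo (beseda : String) : String :=
  let a := pvFindA beseda.toList beseda.toList 0
  -- 'for b in a[::-1]' iterates a reversed: a[::-1] = a.reverse (PySem.List.slice?_none_none_neg_one)
  String.ofList (pvTrimA a a.reverse 0)

def se_zacne_z (tweet : String) (c : String) : List String :=
  let t := PySem.Str.split₀ tweet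
  let temp := t.foldl (fun acc word => if PySem.Str.startswith word c then acc ++ [word] else acc) []
  temp.foldl (fun acc word => acc ++ [izloci_besedo word]) []

-- ===== PORT B =====
-- idxs = [i for i, ch in enumerate(word) if ch.isalnum()]; word[idxs[0]:idxs[-1]+1] if idxs else ''
def pvStrip (w : List Char) : List Char :=
  let idxs := ((PySem.List.enumerate w 0).filter (fun q => PySem.Chars.isalnum q.2)).map (fun q => q.1)
  if h : idxs = [] then []                -- '' if idxs is empty
  else PySem.List.slice w (some (idxs.head h)) (some (idxs.getLast h + 1))  -- word[idxs[0]:idxs[-1]+1]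

def se_zacne_z_alt (tweet : String) (c : String) : List String :=
  ((PySem.Str.split₀ tweet).filter (fun w => PySem.Str.startswith w c)).map
    (fun w => String.ofList (pvStrip w.toList))

-- ===== PRECONDITION & SPEC =====
def Spec_se_zacne_z (tweet : String) (c : String) (out : List String) : Prop := out = se_zacne_z_alt tweet c
instance (tweet : String) (c : String) (out : List String) : Decidable (Spec_se_zacne_z tweet c out) := by unfold Spec_se_zacne_z; infer_instance

-- ===== CLAIM (what is proved, stated in full; the proofs are below) =====
def Claim_equal_se_zacne_z : Prop := ∀ (tweet : String) (c : String), Dom_se_zacne_z tweet c → Spec_se_zacne_z tweet c (se_zacne_z tweet c)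

-- ===== LEMMAS AND PROOFS =====

-- the non-alphanumeric predicate both strippers scan with
def pvP (ch : Char) : Bool := !PySem.Chars.isalnum ch

-- the common normal form: drop leading non-alnum, then trailing non-alnum
def pvCanon (w : List Char) : List Char :=
  ((w.dropWhile pvP).reverse.dropWhile pvP).reverse

-- proof-side mirror of B's index list (with an arbitrary enumerate start)
def pvJ : List Char → Int → List Int
  | [], _ => []
  | b :: rest, s => if PySem.Chars.isalnum b then s :: pvJ rest (s + 1) else pvJ rest (s + 1)

theorem pvJ_spec (w : List Char) (s : Int) :
    ((PySem.List.enumerate w s).filter (fun q => PySem.Chars.isalnum q.2)).map (fun q => q.1) = pvJ w s := by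
  induction w generalizing s with
  | nil => simp [pvJ, PySem.List.enumerate_nil]
  | cons b rest ih =>
    rw [PySem.List.enumerate_cons, List.filter_cons]
    by_cases h : PySem.Chars.isalnum b <;> simp [pvJ, h, ih]

theorem pvJ_shift (w : List Char) (s : Int) : pvJ w s = (pvJ w 0).map (s + ·) := by
  induction w generalizing s with
  | nil => simp [pvJ]
  | cons b rest ih =>
    by_cases h : PySem.Chars.isalnum b <;>
      simp [pvJ, h, ih (s + 1), ih 1, add_assoc]

theorem pvJ_append (u v : List Char) (s : Int) :
    pvJ (u ++ v) s = pvJ u s ++ pvJ v (s + u.length) := by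
  induction u generalizing s with
  | nil => simp [pvJ]
  | cons b rest ih =>
    by_cases h : PySem.Chars.isalnum b <;>
      simp [pvJ, h, ih (s + 1)] <;> ring_nf

theorem pvJ_eq_nil_iff (w : List Char) (s : Int) :
    pvJ w s = [] ↔ ∀ x ∈ w, pvP x := by
  induction w generalizing s with
  | nil => simp [pvJ]
  | cons b rest ih =>
    by_cases h : PySem.Chars.isalnum b <;> simp [pvJ, h, ih, pvP]

theorem pvJ_head (w : List Char) (i0 : Int) (rest : List Int) (h : pvJ w 0 = i0 :: rest) :
    i0 = ((w.takeWhile pvP).length : Int) := by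
  induction w generalizing i0 rest with
  | nil => simp [pvJ] at h
  | cons b t ih =>
    by_cases hb : PySem.Chars.isalnum b
    · simp [pvJ, hb] at h
      simp [pvP, hb, ← h.1]
    · have h' : pvJ t 1 = i0 :: rest := by
        simpa [pvJ, hb] using h
      rw [pvJ_shift t 1] at h'
      cases hj : pvJ t 0 with
      | nil => rw [hj] at h'; simp at h'
      | cons j0 jr =>
        rw [hj] at h'
        simp at h'
        obtain ⟨h1, -⟩ := h'
        have h2 := ih j0 jr hj
        simp [pvP, hb]
        omega

theorem pvJ_reverse (w : List Char) :
    pvJ w.reverse 0 = ((pvJ w 0).map (fun i => (w.length : Int) - 1 - i)).reverse := by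
  induction w with
  | nil => simp [pvJ]
  | cons b t ih =>
    have e1 : pvJ (b :: t) 0
        = (if PySem.Chars.isalnum b then [(0 : Int)] else []) ++ (pvJ t 0).map (1 + ·) := by
      have hs := pvJ_shift t 1
      by_cases hb : PySem.Chars.isalnum b <;>
        · simp only [pvJ, hb, if_true, if_false, zero_add, hs]
          simp
    have e2 : pvJ [b] ((0 : Int) + t.reverse.length)
        = (if PySem.Chars.isalnum b then [(t.length : Int)] else []) := by
      by_cases hb : PySem.Chars.isalnum b <;> simp [pvJ, hb]
    rw [List.reverse_cons, pvJ_append, ih, e2, e1]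
    have hmap : ∀ g : Int → Int, (∀ x, g x = (t.length : Int) - 1 - x) →
        ((pvJ t 0).map (1 + ·)).map (fun i => ((b :: t).length : Int) - 1 - i) = (pvJ t 0).map g := by
      intro g hg
      rw [List.map_map]
      apply List.map_congr_left
      intro x _
      simp [hg x]
      push_cast
      ring
    by_cases hb : PySem.Chars.isalnum b <;>
      simp [hb, hmap (fun i => (t.length : Int) - 1 - i) (fun _ => rfl)] <;>
      · intro a _
        ring

theorem pvJ_getLast (w : List Char) (i0 : Int) (rest : List Int) (h : pvJ w 0 = i0 :: rest) :
    (i0 :: rest).getLast (List.cons_ne_nil _ _)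
      = (w.length : Int) - 1 - ((w.reverse.takeWhile pvP).length : Int) := by
  have hrev := pvJ_reverse w
  rw [h] at hrev
  cases hr : pvJ w.reverse 0 with
  | nil =>
    rw [hr] at hrev
    simp at hrev
  | cons j0 jr =>
    have hj0 := pvJ_head w.reverse j0 jr hr
    rw [hr] at hrev
    have h1 : some j0 = ((i0 :: rest).map (fun i => (w.length : Int) - 1 - i)).getLast? := by
      rw [← List.head?_reverse, ← hrev]
      rfl
    rw [List.getLast?_eq_some_getLast (by simp)] at h1
    have h2 := Option.some.inj h1
    rw [List.getLast_map] at h2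
    omega

-- A's first loop computes dropWhile pvP
theorem pvFindA_eq (orig : List Char) (rest : List Char) (k : Nat) (hk : rest = orig.drop k) :
    pvFindA orig rest (k : Int) = rest.dropWhile pvP := by
  induction rest generalizing k with
  | nil => simp [pvFindA]
  | cons b t ih =>
    by_cases hb : PySem.Chars.isalnum b
    · have : pvFindA orig (b :: t) (k : Int) = PySem.List.slice orig (some (k : Int)) none := by
        simp [pvFindA, hb]
      rw [this, PySem.List.slice_from_natCast, ← hk]
      simp [List.dropWhile_cons, pvP, hb]
    · have : pvFindA orig (b :: t) (k : Int) = pvFindA orig t ((k : Int) + 1) := by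
        simp [pvFindA, hb]
      rw [this]
      have ht : t = orig.drop (k + 1) := by
        rw [← List.tail_drop, ← hk]; rfl
      have := ih (k + 1) ht
      push_cast at this ⊢
      rw [this]
      simp [List.dropWhile_cons, pvP, hb]

-- A's second loop strips the trailing non-alnum run (given some alnum char remains)
theorem pvTrimA_eq (a : List Char) (rest : List Char) (k : Nat) (hk : rest = a.reverse.drop k)
    (hne : rest.dropWhile pvP ≠ []) :
    pvTrimA a rest (k : Int) = (rest.dropWhile pvP).reverse := by
  induction rest generalizing k with
  | nil => simp at hne
  | cons b t ih =>
    by_cases hb : PySem.Chars.isalnum b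
    · have hd : (b :: t).dropWhile pvP = b :: t := by simp [List.dropWhile_cons, pvP, hb]
      rw [hd]
      rcases Nat.eq_zero_or_pos k with hk0 | hkpos
      · subst hk0
        simp only [Nat.cast_zero] at *
        have : pvTrimA a (b :: t) 0 = a := by simp [pvTrimA, hb]
        rw [this, hk]; simp
      · have hne0 : ((k : Int) == 0) = false := by
          simp; omega
        have : pvTrimA a (b :: t) (k : Int) = PySem.List.slice a none (some (-(k : Int))) := by
          simp [pvTrimA, hb, hne0]
        rw [this, PySem.List.slice_to_neg_natCast a k hkpos, hk, List.reverse_drop]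
        simp
    · have : pvTrimA a (b :: t) (k : Int) = pvTrimA a t ((k : Int) + 1) := by
        simp [pvTrimA, hb]
      rw [this]
      have hdw : (b :: t).dropWhile pvP = t.dropWhile pvP := by
        simp [List.dropWhile_cons, pvP, hb]
      have ht : t = a.reverse.drop (k + 1) := by
        rw [← List.tail_drop, ← hk]; rfl
      rw [hdw] at hne
      have := ih (k + 1) ht hne
      push_cast at this ⊢
      rw [this, hdw]

-- dropWhile as a drop (used to align both strippers' slices)
theorem dropWhile_eq_drop (p : Char → Bool) (l : List Char) :
    l.dropWhile p = l.drop (l.takeWhile p).length := by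
  induction l with
  | nil => rfl
  | cons x t ih => by_cases hp : p x <;> simp [List.dropWhile_cons, List.takeWhile_cons, hp, ih]

-- A's core equals the normal form
theorem izloci_eq_canon (s : String) : (izloci_besedo s).toList = pvCanon s.toList := by
  unfold izloci_besedo
  rw [String.toList_ofList]
  have hfind : pvFindA s.toList s.toList 0 = s.toList.dropWhile pvP := by
    simpa using pvFindA_eq s.toList s.toList 0 (by simp)
  rw [hfind]
  unfold pvCanon
  cases hd : s.toList.dropWhile pvP with
  | nil => simp [pvTrimA]
  | cons x t =>
    have hne : s.toList.dropWhile pvP ≠ [] := by rw [hd]; simp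
    have hx : pvP ((s.toList.dropWhile pvP).head hne) = false := List.head_dropWhile_not pvP hne
    have hxx : (s.toList.dropWhile pvP).head hne = x := by simp [hd]
    rw [hxx] at hx
    have hnil : (x :: t).reverse.dropWhile pvP ≠ [] := by
      intro hc
      have := List.dropWhile_eq_nil_iff.mp hc x (by simp)
      rw [hx] at this
      exact Bool.noConfusion this
    have := pvTrimA_eq (x :: t) (x :: t).reverse 0 (by simp) hnil
    simpa using this

-- B's core equals the normal form
theorem pvStrip_eq_canon (w : List Char) : pvStrip w = pvCanon w := by
  unfold pvStrip
  simp only [pvJ_spec]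
  by_cases hnil : pvJ w 0 = []
  · rw [dif_pos hnil]
    have hall : ∀ x ∈ w, pvP x := (pvJ_eq_nil_iff w 0).mp hnil
    have : w.dropWhile pvP = [] := List.dropWhile_eq_nil_iff.mpr hall
    simp [pvCanon, this]
  · rw [dif_neg hnil]
    obtain ⟨i0, rest, hJ⟩ := List.exists_cons_of_ne_nil hnil
    simp only [hJ, List.head_cons]
    rw [pvJ_getLast w i0 rest hJ, pvJ_head w i0 rest hJ]
    -- some character of w is alphanumeric
    have hmem : ∃ x ∈ w, pvP x = false := by
      by_contra hc
      push Not at hc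
      have hall : ∀ x ∈ w, pvP x := by
        intro x hx
        cases hpx : pvP x with
        | true => rfl
        | false => exact absurd hpx (hc x hx)
      exact hnil ((pvJ_eq_nil_iff w 0).mpr hall)
    -- so the trailing non-alnum run is a proper suffix
    have htr_lt : (w.reverse.takeWhile pvP).length < w.length := by
      by_contra hcon
      push Not at hcon
      have heq : w.reverse.takeWhile pvP = w.reverse :=
        (List.takeWhile_prefix pvP).eq_of_length
          (le_antisymm (List.takeWhile_prefix pvP).length_le (by simpa using hcon))
      obtain ⟨x, hxw, hxf⟩ := hmem
      have hx' : x ∈ w.reverse.takeWhile pvP := by rw [heq]; simpa using hxw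
      have := List.mem_takeWhile_imp hx'
      rw [hxf] at this
      exact Bool.noConfusion this
    -- rewrite the slice bounds as natural numbers
    have hb1 : (w.length : Int) - 1 - ((w.reverse.takeWhile pvP).length : Int) + 1
        = ((w.length - (w.reverse.takeWhile pvP).length : Nat) : Int) := by
      push_cast [Nat.cast_sub (le_of_lt htr_lt)]
      ring
    rw [hb1, PySem.List.slice_natCast]
    -- the stripped-front part is nonempty and its head is alphanumeric
    have hvne : w.dropWhile pvP ≠ [] := by
      intro hc
      obtain ⟨x, hxw, hxf⟩ := hmem
      have := List.dropWhile_eq_nil_iff.mp hc x hxw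
      rw [hxf] at this
      exact Bool.noConfusion this
    have hvlast : pvP ((w.dropWhile pvP).head hvne) = false := List.head_dropWhile_not pvP hvne
    have hnotall :
        ((w.dropWhile pvP).reverse.takeWhile pvP).length ≠ (w.dropWhile pvP).reverse.length := by
      intro hc
      have heq : (w.dropWhile pvP).reverse.takeWhile pvP = (w.dropWhile pvP).reverse :=
        (List.takeWhile_prefix pvP).eq_of_length hc
      have hx' : (w.dropWhile pvP).head hvne ∈ (w.dropWhile pvP).reverse.takeWhile pvP := by
        rw [heq]
        simp [List.head_mem]
      have := List.mem_takeWhile_imp hx'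
      rw [hvlast] at this
      exact Bool.noConfusion this
    -- the trailing run of w equals the trailing run of the front-stripped word
    have hsplit : w.reverse = (w.dropWhile pvP).reverse ++ (w.takeWhile pvP).reverse := by
      rw [← List.reverse_append, List.takeWhile_append_dropWhile]
    have htr_eq : w.reverse.takeWhile pvP = (w.dropWhile pvP).reverse.takeWhile pvP := by
      rw [hsplit, List.takeWhile_append, if_neg hnotall]
    have hcanon : pvCanon w
        = (w.dropWhile pvP).take
            ((w.dropWhile pvP).length - (w.reverse.takeWhile pvP).length) := by
      unfold pvCanon
      rw [dropWhile_eq_drop pvP (w.dropWhile pvP).reverse, ← htr_eq, List.reverse_drop]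
      simp
    rw [hcanon, ← dropWhile_eq_drop pvP w]
    congr 1
    have h1 : (w.dropWhile pvP).length = w.length - (w.takeWhile pvP).length := by
      rw [dropWhile_eq_drop pvP w]
      simp
    have h2 : (w.takeWhile pvP).length ≤ w.length := (List.takeWhile_prefix pvP).length_le
    omega

-- per word: A's stripped word equals B's stripped word
theorem izloci_eq_pvStrip (s : String) : izloci_besedo s = String.ofList (pvStrip s.toList) := by
  rw [pvStrip_eq_canon, ← izloci_eq_canon, String.ofList_toList]

-- top level: the two foldl passes of A are the filter-then-map of B
theorem se_zacne_z_eq (tweet c : String) : se_zacne_z tweet c = se_zacne_z_alt tweet c := by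
  show (((PySem.Str.split₀ tweet).foldl
        (fun acc word => if PySem.Str.startswith word c then acc ++ [word] else acc) []).foldl
        (fun acc word => acc ++ [izloci_besedo word]) [])
      = ((PySem.Str.split₀ tweet).filter (fun w => PySem.Str.startswith w c)).map
          (fun w => String.ofList (pvStrip w.toList))
  rw [PySem.List.foldl_append_if (fun w => PySem.Str.startswith w c) (fun w => w),
      PySem.List.foldl_append_singleton_eq_map]
  simp only [List.nil_append, List.map_map]
  apply List.map_congr_left
  intro w _
  exact izloci_eq_pvStrip w

-- ===== VERDICT (by name: the statement is the Claim_ definition above) =====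
theorem se_zacne_z_spec : Claim_equal_se_zacne_z := by
  intro tweet c _
  show se_zacne_z tweet c = se_zacne_z_alt tweet c
  exact se_zacne_z_eq tweet c
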